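-- pv_equiv track=rewrite | github.com/BadWolf1509/licitafacil | backend/services/description_fixer/matching.py | filter_candidates_by_page
-- ===== SOURCE A (Python) =====
-- from typing import Dict, List, Optional, Tuple
--
-- def filter_candidates_by_page(
--     candidates: List[Dict],
--     servico_page: Optional[int],
--     line_to_page: Optional[Dict[int, int]],
--     max_page_distance: int = 2
-- ) -> List[Dict]:
--     """
--     Filtra candidatos por proximidade de página.
--
--     Returns:
--         Lista filtrada de candidatos.
--     """
--     if not servico_page or not line_to_page:
--         return candidates
--
--     same_page = [
--         c for c in candidates
--         if line_to_page.get(c['linha']) == servico_page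
--     ]
--     if same_page:
--         return same_page
--
--     nearby = [
--         c for c in candidates
--         if abs(line_to_page.get(c['linha'], 0) - servico_page) <= max_page_distance
--     ]
--     if nearby:
--         return nearby
--
--     return []
-- ===== SOURCE B (Python) =====
-- def filter_candidates_by_page(candidates, servico_page, line_to_page, max_page_distance=2):
--     if not servico_page or not line_to_page:
--         return candidates
--     # Single pass with one accumulator and an "exact" mode flag: collect nearby
--     # candidates until the first same-page candidate appears, then switch to
--     # collecting same-page candidates only (resetting the accumulator).
--     acc = []
--     exact = False
--     for c in candidates:
--         p = line_to_page.get(c['linha'])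
--         if p == servico_page:
--             if not exact:
--                 acc = []
--                 exact = True
--             acc.append(c)
--         elif not exact and abs((p if p is not None else 0) - servico_page) <= max_page_distance:
--             acc.append(c)
--     return acc
-- ===== Notes on version B (the rewrite author's own statement) =====
-- stated objective: alternative
-- what changed: Replaces A's two full filtering passes (same_page list, then nearby list) with a single pass keeping one accumulator and a mode flag that escalates from 'nearby' to 'exact' at the first same-page candidate, resetting the accumulator.
import Mathlib
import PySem

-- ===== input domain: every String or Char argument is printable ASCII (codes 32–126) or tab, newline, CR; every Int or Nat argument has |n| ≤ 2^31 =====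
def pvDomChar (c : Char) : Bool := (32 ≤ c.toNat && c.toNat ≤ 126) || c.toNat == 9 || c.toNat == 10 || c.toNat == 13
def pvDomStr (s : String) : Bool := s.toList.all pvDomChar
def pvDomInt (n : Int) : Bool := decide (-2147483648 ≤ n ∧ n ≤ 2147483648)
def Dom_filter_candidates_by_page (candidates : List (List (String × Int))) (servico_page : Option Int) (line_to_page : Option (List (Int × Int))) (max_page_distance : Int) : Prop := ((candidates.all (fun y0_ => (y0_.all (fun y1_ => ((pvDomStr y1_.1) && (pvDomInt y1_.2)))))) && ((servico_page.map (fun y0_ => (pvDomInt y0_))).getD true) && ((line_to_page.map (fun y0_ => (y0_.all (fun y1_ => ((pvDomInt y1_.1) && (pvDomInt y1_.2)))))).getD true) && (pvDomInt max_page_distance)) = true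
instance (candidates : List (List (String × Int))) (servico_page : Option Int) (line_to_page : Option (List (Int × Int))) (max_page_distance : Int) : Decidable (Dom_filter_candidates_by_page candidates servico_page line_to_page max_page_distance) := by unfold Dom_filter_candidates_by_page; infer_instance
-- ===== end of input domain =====

-- B replaces A's two successive filtering passes by a single pass with one accumulator
-- and a mode flag that escalates to 'exact' at the first same-page candidate (objective: alternative).

-- ===== PORT A =====
-- Python's abs on int, written out explicitly (shared by both ports)
def pyabs (x : Int) : Int := if x < 0 then -x else x

-- c['linha'] raises KeyError when the key is missing; Pre_ excludes that, so the port
-- reads the key with a default (.getD 0) which is never reached inside Pre_.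
def filter_candidates_by_page (candidates : List (List (String × Int))) (servico_page : Option Int) (line_to_page : Option (List (Int × Int))) (max_page_distance : Int) : List (List (String × Int)) :=
  if servico_page = none ∨ servico_page = some 0 ∨ line_to_page = none ∨ line_to_page = some [] then
    candidates
  else
    let sp := servico_page.getD 0
    let ltp := line_to_page.getD []
    let same_page := candidates.filter (fun c => ltp.lookup ((c.lookup "linha").getD 0) == some sp)
    if same_page ≠ [] then same_page
    else
      let nearby := candidates.filter (fun c => decide (pyabs ((ltp.lookup ((c.lookup "linha").getD 0)).getD 0 - sp) ≤ max_page_distance))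
      if nearby ≠ [] then nearby
      else []

-- ===== PORT B =====
-- the single-pass loop of Source B as structural recursion over the candidates
def pvLoop (ltp : List (Int × Int)) (sp mpd : Int) : List (List (String × Int)) → (List (List (String × Int)) × Bool) → (List (List (String × Int)) × Bool)
  | [], st => st
  | c :: t, st =>
      let p := ltp.lookup ((c.lookup "linha").getD 0)
      pvLoop ltp sp mpd t
        (if p == some sp then (if st.2 then st.1 ++ [c] else [c], true)
         else if !st.2 && decide (pyabs (p.getD 0 - sp) ≤ mpd) then (st.1 ++ [c], st.2)
         else st)

def filter_candidates_by_page_alt (candidates : List (List (String × Int))) (servico_page : Option Int) (line_to_page : Option (List (Int × Int))) (max_page_distance : Int) : List (List (String × Int)) :=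
  if servico_page = none ∨ servico_page = some 0 ∨ line_to_page = none ∨ line_to_page = some [] then
    candidates
  else
    let sp := servico_page.getD 0
    let ltp := line_to_page.getD []
    (pvLoop ltp sp max_page_distance candidates ([], false)).1

-- ===== PRECONDITION & SPEC =====
-- Pre_ excludes exactly the inputs on which A raises KeyError: the page filter is
-- actually entered (the guard is false) and some candidate lacks the key "linha".
def Pre_filter_candidates_by_page (candidates : List (List (String × Int))) (servico_page : Option Int) (line_to_page : Option (List (Int × Int))) (max_page_distance : Int) : Prop :=
  (servico_page = none ∨ servico_page = some 0 ∨ line_to_page = none ∨ line_to_page = some []) ∨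
  ∀ c ∈ candidates, (List.lookup "linha" c).isSome = true
instance (candidates : List (List (String × Int))) (servico_page : Option Int) (line_to_page : Option (List (Int × Int))) (max_page_distance : Int) : Decidable (Pre_filter_candidates_by_page candidates servico_page line_to_page max_page_distance) := by unfold Pre_filter_candidates_by_page; infer_instance

def pvWitness_filter_candidates_by_page : (List (List (String × Int))) × Option Int × (Option (List (Int × Int))) × Int :=
  ([[("linha", 1)], [("linha", 2)]], some 1, some [(1, 1), (2, 5)], 2)

def Spec_filter_candidates_by_page (candidates : List (List (String × Int))) (servico_page : Option Int) (line_to_page : Option (List (Int × Int))) (max_page_distance : Int) (out : List (List (String × Int))) : Prop := out = filter_candidates_by_page_alt candidates servico_page line_to_page max_page_distance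
instance (candidates : List (List (String × Int))) (servico_page : Option Int) (line_to_page : Option (List (Int × Int))) (max_page_distance : Int) (out : List (List (String × Int))) : Decidable (Spec_filter_candidates_by_page candidates servico_page line_to_page max_page_distance out) := by unfold Spec_filter_candidates_by_page; infer_instance

-- ===== CLAIM (what is proved, stated in full; the proofs are below) =====
def Claim_equal_filter_candidates_by_page : Prop := ∀ (candidates : List (List (String × Int))) (servico_page : Option Int) (line_to_page : Option (List (Int × Int))) (max_page_distance : Int), Dom_filter_candidates_by_page candidates servico_page line_to_page max_page_distance → Pre_filter_candidates_by_page candidates servico_page line_to_page max_page_distance → Spec_filter_candidates_by_page candidates servico_page line_to_page max_page_distance (filter_candidates_by_page candidates servico_page line_to_page max_page_distance)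

-- ===== LEMMAS AND PROOFS =====

lemma pvLoop_true (ltp : List (Int × Int)) (sp mpd : Int) (cs : List (List (String × Int))) (acc : List (List (String × Int))) :
    pvLoop ltp sp mpd cs (acc, true)
      = (acc ++ cs.filter (fun c => ltp.lookup ((c.lookup "linha").getD 0) == some sp), true) := by
  induction cs generalizing acc with
  | nil => simp [pvLoop]
  | cons c t ih =>
    simp only [pvLoop, List.filter_cons]
    by_cases h : (ltp.lookup ((c.lookup "linha").getD 0) == some sp) = true
    · simp [h, ih]
    · simp [h, ih]

lemma pvLoop_false (ltp : List (Int × Int)) (sp mpd : Int) (cs : List (List (String × Int))) (acc : List (List (String × Int))) :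
    pvLoop ltp sp mpd cs (acc, false)
      = (if cs.filter (fun c => ltp.lookup ((c.lookup "linha").getD 0) == some sp) = [] then
           (acc ++ cs.filter (fun c => decide (pyabs ((ltp.lookup ((c.lookup "linha").getD 0)).getD 0 - sp) ≤ mpd)), false)
         else
           (cs.filter (fun c => ltp.lookup ((c.lookup "linha").getD 0) == some sp), true)) := by
  induction cs generalizing acc with
  | nil => simp [pvLoop]
  | cons c t ih =>
    simp only [pvLoop, List.filter_cons]
    by_cases h : (ltp.lookup ((c.lookup "linha").getD 0) == some sp) = true
    · simp [h, pvLoop_true]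
    · by_cases hn : (decide (pyabs ((ltp.lookup ((c.lookup "linha").getD 0)).getD 0 - sp) ≤ mpd)) = true
      · simp only [h, hn]
        simp [ih]
      · simp only [h, hn]
        simp [ih]

-- ===== VERDICT (by name: the statement is the Claim_ definition above) =====
theorem filter_candidates_by_page_spec : Claim_equal_filter_candidates_by_page := by
  intro candidates servico_page line_to_page max_page_distance _ _
  unfold Spec_filter_candidates_by_page filter_candidates_by_page filter_candidates_by_page_alt
  by_cases hg : servico_page = none ∨ servico_page = some 0 ∨ line_to_page = none ∨ line_to_page = some []
  · rw [if_pos hg, if_pos hg]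
  · simp only [if_neg hg]
    rw [pvLoop_false]
    by_cases hs : candidates.filter (fun c => (line_to_page.getD []).lookup ((c.lookup "linha").getD 0) == some (servico_page.getD 0)) = []
    · rw [if_pos hs, if_neg (not_ne_iff.mpr hs)]
      by_cases hn : candidates.filter (fun c => decide (pyabs (((line_to_page.getD []).lookup ((c.lookup "linha").getD 0)).getD 0 - servico_page.getD 0) ≤ max_page_distance)) = []
      · rw [if_neg (not_ne_iff.mpr hn)]
        simp [hn]
      · rw [if_pos hn]
        simp
    · rw [if_neg hs, if_pos hs]
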